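-- pv_equiv track=rewrite | github.com/ruebenramirez/hackerrank | sum-sub-array/sum-sub-arrays.py | sum_queries
-- ===== SOURCE A (Python) =====
-- def sum_queries(numbers, queries):
--     query_sums = []
--     for query in queries:
--         left = query[0] - 1
--         right = query[1]
--         zero_replacement = query[2]
--         sub_numbers = numbers[left:right]
--         query_sum = 0
--         for num in sub_numbers:
--             if num != 0:
--                 query_sum += num
--             else:
--                 query_sum += zero_replacement
--         query_sums.append(query_sum)
--     return query_sums
-- ===== SOURCE B (Python) =====
-- def sum_queries(numbers, queries):
--     # Prefix sums of the values and prefix counts of zeros: O(1) per query.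
--     n = len(numbers)
--     prefix_sums = [0]
--     zero_counts = [0]
--     for x in numbers:
--         prefix_sums.append(prefix_sums[-1] + x)
--         zero_counts.append(zero_counts[-1] + (1 if x == 0 else 0))
--
--     def clamp(i):
--         # Python slice-bound normalisation.
--         if i < 0:
--             i += n
--         if i < 0:
--             i = 0
--         if i > n:
--             i = n
--         return i
--
--     result = []
--     for q in queries:
--         l = clamp(q[0] - 1)
--         r = clamp(q[1])
--         z = q[2]
--         if l < r:
--             result.append(prefix_sums[r] - prefix_sums[l]
--                           + z * (zero_counts[r] - zero_counts[l]))
--         else: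
--             result.append(0)
--     return result
-- ===== Notes on version B (the rewrite author's own statement) =====
-- stated objective: faster
-- what changed: Replaces A's per-query scan of the sliced subarray by prefix sums of values and prefix counts of zeros built once, answering each query in O(1) after slice-bound clamping.
-- outside the precondition, e.g. on sum_queries([1, 2], [[1, 2]]): A raises IndexError, B raises IndexError
import Mathlib
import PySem

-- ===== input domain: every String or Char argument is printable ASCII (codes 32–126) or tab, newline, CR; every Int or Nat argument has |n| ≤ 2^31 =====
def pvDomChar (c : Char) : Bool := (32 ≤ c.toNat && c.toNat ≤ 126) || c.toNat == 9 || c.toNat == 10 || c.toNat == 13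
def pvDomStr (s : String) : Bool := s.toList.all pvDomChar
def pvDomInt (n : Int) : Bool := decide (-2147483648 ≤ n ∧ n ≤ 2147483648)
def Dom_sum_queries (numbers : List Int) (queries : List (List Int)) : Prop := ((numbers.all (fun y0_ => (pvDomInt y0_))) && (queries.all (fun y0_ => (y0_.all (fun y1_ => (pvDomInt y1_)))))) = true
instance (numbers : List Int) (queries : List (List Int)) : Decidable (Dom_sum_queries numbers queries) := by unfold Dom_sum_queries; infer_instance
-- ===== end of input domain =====

-- B replaces A's per-query subarray scan by prefix sums of values and prefix counts
-- of zeros built once, answering each query in O(1) (objective: faster, asymptotic).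

-- ===== PORT A =====
def sum_queries (numbers : List Int) (queries : List (List Int)) : List Int :=
  queries.foldl (fun query_sums query =>
    let left := (PySem.List.pyGet? query 0).getD 0 - 1
    let right := (PySem.List.pyGet? query 1).getD 0
    let zero_replacement := (PySem.List.pyGet? query 2).getD 0
    let sub_numbers := PySem.List.slice numbers (some left) (some right)
    let query_sum := sub_numbers.foldl
      (fun s num => if num ≠ 0 then s + num else s + zero_replacement) 0
    query_sums ++ [query_sum]) []

-- ===== PORT B =====
-- Source B's clamp helper (Python slice-bound normalisation)
def pvClampB (n i : Int) : Int :=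
  let j := if i < 0 then i + n else i
  let k := if j < 0 then 0 else j
  if k > n then n else k

-- Source B's prefix-building loop: (prefix_sums, zero_counts)
def pvBuildPZ (numbers : List Int) : List Int × List Int :=
  numbers.foldl (fun pz x =>
    (pz.1 ++ [(PySem.List.pyGet? pz.1 (-1)).getD 0 + x],
     pz.2 ++ [(PySem.List.pyGet? pz.2 (-1)).getD 0 + (if x == 0 then 1 else 0)]))
    ([0], [0])

def sum_queries_alt (numbers : List Int) (queries : List (List Int)) : List Int :=
  let n : Int := numbers.length
  let pz := pvBuildPZ numbers
  queries.foldl (fun result q =>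
    let l := pvClampB n ((PySem.List.pyGet? q 0).getD 0 - 1)
    let r := pvClampB n ((PySem.List.pyGet? q 1).getD 0)
    let z := (PySem.List.pyGet? q 2).getD 0
    let v := if l < r then
        (PySem.List.pyGet? pz.1 r).getD 0 - (PySem.List.pyGet? pz.1 l).getD 0
          + z * ((PySem.List.pyGet? pz.2 r).getD 0 - (PySem.List.pyGet? pz.2 l).getD 0)
      else 0
    result ++ [v]) []

-- ===== PRECONDITION & SPEC =====
-- A raises IndexError on query[0]/query[1]/query[2] when a query has fewer than 3
-- entries; exactly those inputs are excluded.
def Pre_sum_queries (numbers : List Int) (queries : List (List Int)) : Prop :=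
  ∀ q ∈ queries, 3 ≤ q.length
instance (numbers : List Int) (queries : List (List Int)) : Decidable (Pre_sum_queries numbers queries) := by unfold Pre_sum_queries; infer_instance
def pvWitness_sum_queries : List Int × List (List Int) := ([1, 0, 3, -2], [[1, 3, 5], [2, 2, 7], [0, 9, -1]])

def Spec_sum_queries (numbers : List Int) (queries : List (List Int)) (out : List Int) : Prop := out = sum_queries_alt numbers queries
instance (numbers : List Int) (queries : List (List Int)) (out : List Int) : Decidable (Spec_sum_queries numbers queries out) := by unfold Spec_sum_queries; infer_instance

-- ===== CLAIM (what is proved, stated in full; the proofs are below) =====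
def Claim_equal_sum_queries : Prop := ∀ (numbers : List Int) (queries : List (List Int)), Dom_sum_queries numbers queries → Pre_sum_queries numbers queries → Spec_sum_queries numbers queries (sum_queries numbers queries)

-- ===== LEMMAS AND PROOFS =====

-- appending loop = map
theorem pv_foldl_append_map {α : Type} (f : α → Int) (qs : List α) (acc : List Int) :
    qs.foldl (fun a q => a ++ [f q]) acc = acc ++ qs.map f := by
  induction qs generalizing acc with
  | nil => simp
  | cons q qs ih => simp [List.foldl_cons, ih]

-- A's inner loop = sum + z * (number of zeros)
theorem pv_inner_sum (z : Int) (ys : List Int) (a : Int) :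
    ys.foldl (fun s num => if num ≠ 0 then s + num else s + z) a
      = a + ys.sum + z * (ys.count 0 : Int) := by
  induction ys generalizing a with
  | nil => simp
  | cons y ys ih =>
    rw [List.foldl_cons, ih]
    by_cases hy : y = 0 <;>
      simp [hy] <;> ring

-- characterisation of the prefix lists
theorem pv_buildPZ_eq (xs : List Int) :
    pvBuildPZ xs = ((List.range (xs.length + 1)).map (fun i => (xs.take i).sum),
                    (List.range (xs.length + 1)).map (fun i => ((xs.take i).count 0 : Int))) := by
  induction xs using List.reverseRecOn with
  | nil => simp [pvBuildPZ, List.range_succ]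
  | append_singleton ys y ih =>
    unfold pvBuildPZ at *
    rw [List.foldl_append, ih]
    simp only [List.foldl_cons, List.foldl_nil]
    have hlast : ∀ (f : Nat → Int),
        (PySem.List.pyGet? ((List.range (ys.length + 1)).map f) (-1)).getD 0 = f ys.length := by
      intro f
      rw [PySem.List.pyGet?_neg_one, List.range_succ, List.map_append]
      simp
    rw [hlast, hlast]
    have hmap : ∀ (g : List Int → Int),
        (List.range ((ys ++ [y]).length + 1)).map (fun i => g ((ys ++ [y]).take i))
          = (List.range (ys.length + 1)).map (fun i => g (ys.take i)) ++ [g (ys ++ [y])] := by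
      intro g
      rw [show (ys ++ [y]).length + 1 = (ys.length + 1) + 1 by simp, List.range_succ,
        List.map_append]
      congr 1
      · apply List.map_congr_left
        intro i hi
        simp only [List.mem_range] at hi
        rw [List.take_append_of_le_length (by omega)]
      · simp only [List.map_singleton]
        rw [List.take_of_length_le (by simp)]
    rw [Prod.mk.injEq]
    refine ⟨?_, ?_⟩
    · rw [hmap (fun l => l.sum)]
      simp [List.take_of_length_le]
    · rw [hmap (fun l => (l.count 0 : Int))]
      simp only [List.count_append, List.take_of_length_le (le_refl ys.length)]
      by_cases hy : y = 0 <;> simp [hy]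

-- indexing the prefix lists inside range
theorem pv_get_prefix (f : Nat → Int) (n : Nat) (i : Int) (h0 : 0 ≤ i) (hn : i ≤ (n : Int)) :
    (PySem.List.pyGet? ((List.range (n + 1)).map f) i).getD 0 = f i.toNat := by
  rw [PySem.List.pyGet?_of_nonneg _ h0, List.getElem?_map, List.getElem?_range (by omega)]
  rfl

-- pvClampB is clampIdx
theorem pv_clampB_eq (xs : List Int) (i : Int) :
    pvClampB (xs.length : Int) i = (PySem.List.clampIdx xs.length i : Int) := by
  unfold pvClampB PySem.List.clampIdx
  simp only []
  split_ifs <;> omega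

-- sum and count over a clamped drop/take window, as prefix differences
theorem pv_window (xs : List Int) (a b : Nat) (hab : a ≤ b) :
    ((xs.drop a).take (b - a)).sum = (xs.take b).sum - (xs.take a).sum ∧
    (((xs.drop a).take (b - a)).count 0 : Int) = ((xs.take b).count 0 : Int) - ((xs.take a).count 0 : Int) := by
  have hsplit : xs.take b = xs.take a ++ (xs.drop a).take (b - a) := by
    rw [← List.take_append_drop a (xs.take b)]
    congr 1
    · rw [List.take_take, Nat.min_eq_left hab]
    · rw [List.drop_take]
  constructor
  · rw [hsplit, List.sum_append]; ring
  · rw [hsplit, List.count_append]; push_cast; ring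

-- per-query equality
theorem pv_query_eq (xs : List Int) (L R z : Int) :
    (PySem.List.slice xs (some L) (some R)).foldl
        (fun s num => if num ≠ 0 then s + num else s + z) 0
      = (if pvClampB (xs.length : Int) L < pvClampB (xs.length : Int) R then
          (PySem.List.pyGet? (pvBuildPZ xs).1 (pvClampB (xs.length : Int) R)).getD 0
            - (PySem.List.pyGet? (pvBuildPZ xs).1 (pvClampB (xs.length : Int) L)).getD 0
            + z * ((PySem.List.pyGet? (pvBuildPZ xs).2 (pvClampB (xs.length : Int) R)).getD 0
                - (PySem.List.pyGet? (pvBuildPZ xs).2 (pvClampB (xs.length : Int) L)).getD 0)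
        else 0) := by
  have hL := pv_clampB_eq xs L
  have hR := pv_clampB_eq xs R
  set a := PySem.List.clampIdx xs.length L with hadef
  set b := PySem.List.clampIdx xs.length R with hbdef
  have hslice : PySem.List.slice xs (some L) (some R) = (xs.drop a).take (b - a) := by
    simp [PySem.List.slice, hadef, hbdef]
  rw [hslice, pv_inner_sum, pv_buildPZ_eq, hL, hR]
  have ha_le : a ≤ xs.length := PySem.List.clampIdx_le _ _
  have hb_le : b ≤ xs.length := PySem.List.clampIdx_le _ _
  by_cases hab : a < b
  · have hcond : ((a : Int) < (b : Int)) := by exact_mod_cast hab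
    rw [if_pos hcond]
    rw [pv_get_prefix _ _ _ (by positivity) (by exact_mod_cast hb_le),
        pv_get_prefix _ _ _ (by positivity) (by exact_mod_cast ha_le),
        pv_get_prefix _ _ _ (by positivity) (by exact_mod_cast hb_le),
        pv_get_prefix _ _ _ (by positivity) (by exact_mod_cast ha_le)]
    simp only [Int.toNat_natCast]
    obtain ⟨h1, h2⟩ := pv_window xs a b (le_of_lt hab)
    rw [h1, h2]; ring
  · have hcond : ¬ ((a : Int) < (b : Int)) := by exact_mod_cast hab
    rw [if_neg hcond]
    have : b - a = 0 := by omega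
    simp [this]

-- ===== VERDICT (by name: the statement is the Claim_ definition above) =====
theorem sum_queries_spec : Claim_equal_sum_queries := by
  intro numbers queries _ _
  unfold Spec_sum_queries sum_queries sum_queries_alt
  rw [pv_foldl_append_map, pv_foldl_append_map]
  simp only [List.nil_append]
  apply List.map_congr_left
  intro q _
  exact pv_query_eq numbers ((PySem.List.pyGet? q 0).getD 0 - 1) ((PySem.List.pyGet? q 1).getD 0)
    ((PySem.List.pyGet? q 2).getD 0)
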